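-- pv_equiv track=rewrite | github.com/MrBrantCode/unitest_baseline | mut_generate/mist_train_cf/cf_32122/solution.py | calculate_online_time
-- ===== SOURCE A (Python) =====
-- from typing import List, Dict
--
-- def calculate_online_time(actions: List[str]) -> Dict[str, int]:
--     online_time = {}
--     current_employee = ""
--     online_start = 0
--     total_online_time = 0
--     leave_count = 0
--     for i, action in enumerate(actions):
--         if action.startswith("employee"):
--             if current_employee:
--                 online_time[current_employee] = total_online_time
--             current_employee = action
--             online_start = i
--             total_online_time = 0
--             leave_count = 0
--         elif action == "online":
--             online_start = i
--         elif action == "offline":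
--             total_online_time += i - online_start - leave_count
--         elif action == "leave":
--             leave_count += 1
--     if current_employee:
--         online_time[current_employee] = total_online_time
--     return online_time
-- ===== SOURCE B (Python) =====
-- from typing import List, Dict
--
-- def calculate_online_time(actions: List[str]) -> Dict[str, int]:
--     # Pass 1: split the log into per-employee segments: (name, employee_index, body),
--     # body = the (index, action) pairs until the next employee token.
--     # Actions before the first employee token belong to no segment and are dropped.
--     segments = []
--     current = None
--     for i, action in enumerate(actions):
--         if action.startswith("employee"):
--             if current is not None:
--                 segments.append(current)
--             current = (action, i, [])
--         elif current is not None: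
--             name, start, body = current
--             current = (name, start, body + [(i, action)])
--     if current is not None:
--         segments.append(current)
--     # Pass 2: evaluate each segment independently; assignment in segment order
--     # keeps last-wins semantics for duplicate employee names.
--     online_time = {}
--     for name, start, body in segments:
--         online_start, total, leave = start, 0, 0
--         for i, action in body:
--             if action == "online":
--                 online_start = i
--             elif action == "offline":
--                 total += i - online_start - leave
--             elif action == "leave":
--                 leave += 1
--         online_time[name] = total
--     return online_time
-- ===== Notes on version B (the rewrite author's own statement) =====
-- stated objective: alternative
-- what changed: B replaces A's single streaming pass with interleaved dict/arithmetic state by a two-phase decomposition: first split the log into per-employee segments (index, action pairs), then evaluate each segment independently and assign totals in segment order.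
import Mathlib
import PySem

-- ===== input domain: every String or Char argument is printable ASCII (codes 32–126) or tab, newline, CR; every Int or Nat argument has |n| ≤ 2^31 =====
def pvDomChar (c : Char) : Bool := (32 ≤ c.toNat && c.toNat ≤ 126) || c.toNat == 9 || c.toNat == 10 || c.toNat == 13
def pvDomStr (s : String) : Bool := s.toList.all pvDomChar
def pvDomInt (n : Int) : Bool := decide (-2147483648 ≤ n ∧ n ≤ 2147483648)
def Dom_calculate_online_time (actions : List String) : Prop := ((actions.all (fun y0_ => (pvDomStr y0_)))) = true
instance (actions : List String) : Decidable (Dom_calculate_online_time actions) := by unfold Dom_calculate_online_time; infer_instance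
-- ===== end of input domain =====

-- B restructures A's single streaming pass into a two-phase decomposition (split into per-employee segments, then evaluate each segment); same cost, return values proved equal.

-- ===== PORT A =====
-- A's loop state: (dict, current_employee, online_start, total_online_time, leave_count)
def pvAStep (st : PySem.Dict String Int × String × Int × Int × Int) (p : Int × String) :
    PySem.Dict String Int × String × Int × Int × Int :=
  match st, p with
  | (d, cur, s, t, l), (i, a) =>
    if PySem.Str.startswith a "employee" then
      ((if cur ≠ "" then d.insert cur t else d), a, i, 0, 0)
    else if a = "online" then (d, cur, i, t, l)
    else if a = "offline" then (d, cur, s, t + (i - s - l), l)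
    else if a = "leave" then (d, cur, s, t, l + 1)
    else (d, cur, s, t, l)

def calculate_online_time (actions : List String) : List (String × Int) :=
  match (PySem.List.enumerate actions).foldl pvAStep (PySem.Dict.empty, "", 0, 0, 0) with
  | (d, cur, _, t, _) => (if cur ≠ "" then d.insert cur t else d).items

-- ===== PORT B =====
-- a segment: (employee name, employee index, body of (index, action) pairs)
abbrev pvSeg : Type := String × Int × List (Int × String)

-- pass-1 loop body; state: (finished segments, optional open segment)
def pvPass1 (st : List pvSeg × Option pvSeg) (p : Int × String) : List pvSeg × Option pvSeg :=
  match st, p with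
  | (segs, cur), (i, a) =>
    if PySem.Str.startswith a "employee" then
      ((match cur with | some c => segs ++ [c] | none => segs), some (a, i, []))
    else
      match cur with
      | some (n, s, b) => (segs, some (n, s, b ++ [(i, a)]))
      | none => (segs, none)

-- pass-2 inner loop body over one segment's (index, action) pairs
def pvSegStep (st : Int × Int × Int) (p : Int × String) : Int × Int × Int :=
  match st, p with
  | (s, t, l), (i, a) =>
    if a = "online" then (i, t, l)
    else if a = "offline" then (s, t + (i - s - l), l)
    else if a = "leave" then (s, t, l + 1)
    else (s, t, l)

-- pass-2 outer loop body: evaluate one segment and assign its total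
def pvInsSeg (d : PySem.Dict String Int) (seg : pvSeg) : PySem.Dict String Int :=
  match seg with
  | (n, s, b) =>
    match b.foldl pvSegStep (s, 0, 0) with
    | (_, t, _) => d.insert n t

def calculate_online_time_alt (actions : List String) : List (String × Int) :=
  match (PySem.List.enumerate actions).foldl pvPass1 ([], none) with
  | (segs0, cur) =>
    (match cur with
     | some c => (segs0 ++ [c]).foldl pvInsSeg PySem.Dict.empty
     | none => segs0.foldl pvInsSeg PySem.Dict.empty).items

-- ===== PRECONDITION & SPEC =====
def Spec_calculate_online_time (actions : List String) (out : List (String × Int)) : Prop := out = calculate_online_time_alt actions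
instance (actions : List String) (out : List (String × Int)) : Decidable (Spec_calculate_online_time actions out) := by unfold Spec_calculate_online_time; infer_instance

-- ===== CLAIM (what is proved, stated in full; the proofs are below) =====
def Claim_equal_calculate_online_time : Prop := ∀ (actions : List String), Dom_calculate_online_time actions → Spec_calculate_online_time actions (calculate_online_time actions)

-- ===== LEMMAS AND PROOFS =====

def pvFlush (cur : Option pvSeg) : List pvSeg :=
  match cur with | some c => [c] | none => []

def pvFinA (st : PySem.Dict String Int × String × Int × Int × Int) : PySem.Dict String Int :=
  match st with
  | (d, cur, _, t, _) => if cur ≠ "" then d.insert cur t else d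

-- recursive description of pass 1 (including the final flush)
def pvRunRec : List (Int × String) → Option pvSeg → List pvSeg
  | [], cur => pvFlush cur
  | (i, a) :: ps, cur =>
    if PySem.Str.startswith a "employee" then
      pvFlush cur ++ pvRunRec ps (some (a, i, []))
    else
      match cur with
      | some (n, s, b) => pvRunRec ps (some (n, s, b ++ [(i, a)]))
      | none => pvRunRec ps none

theorem pvPass1_step_acc (segs : List pvSeg) (cur : Option pvSeg) (i : Int) (a : String) :
    pvPass1 (segs, cur) (i, a) =
      (segs ++ (pvPass1 ([], cur) (i, a)).1, (pvPass1 ([], cur) (i, a)).2) := by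
  by_cases h : PySem.Chars.startswith a.toList ['e','m','p','l','o','y','e','e'] = true
  · cases cur with
    | none => simp [pvPass1, h]
    | some c => obtain ⟨n, s, b⟩ := c; simp [pvPass1, h]
  · cases cur with
    | none => simp [pvPass1, h]
    | some c => obtain ⟨n, s, b⟩ := c; simp [pvPass1, h]

theorem pvPass1_acc (ps : List (Int × String)) :
    ∀ (segs : List pvSeg) (cur : Option pvSeg),
    ps.foldl pvPass1 (segs, cur) =
      (segs ++ (ps.foldl pvPass1 ([], cur)).1, (ps.foldl pvPass1 ([], cur)).2) := by
  induction ps with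
  | nil => intro segs cur; simp
  | cons p ps ih =>
    intro segs cur
    obtain ⟨i, a⟩ := p
    simp only [List.foldl_cons]
    rw [pvPass1_step_acc segs cur i a]
    rw [ih (segs ++ (pvPass1 ([], cur) (i, a)).1) ((pvPass1 ([], cur) (i, a)).2)]
    rw [show ps.foldl pvPass1 (pvPass1 ([], cur) (i, a)) =
          ps.foldl pvPass1 ((pvPass1 ([], cur) (i, a)).1, (pvPass1 ([], cur) (i, a)).2) from rfl]
    rw [ih ((pvPass1 ([], cur) (i, a)).1) ((pvPass1 ([], cur) (i, a)).2)]
    simp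

theorem pvRunRec_eq (ps : List (Int × String)) :
    ∀ (cur : Option pvSeg),
    pvRunRec ps cur =
      (ps.foldl pvPass1 ([], cur)).1 ++ pvFlush ((ps.foldl pvPass1 ([], cur)).2) := by
  induction ps with
  | nil => intro cur; simp [pvRunRec]
  | cons p ps ih =>
    intro cur
    obtain ⟨i, a⟩ := p
    simp only [List.foldl_cons]
    rw [show ps.foldl pvPass1 (pvPass1 ([], cur) (i, a)) =
          ps.foldl pvPass1 ((pvPass1 ([], cur) (i, a)).1, (pvPass1 ([], cur) (i, a)).2) from rfl]
    rw [pvPass1_acc ps ((pvPass1 ([], cur) (i, a)).1) ((pvPass1 ([], cur) (i, a)).2)]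
    by_cases h : PySem.Chars.startswith a.toList ['e','m','p','l','o','y','e','e'] = true
    · have hp : pvPass1 ([], cur) (i, a) = (pvFlush cur, some (a, i, [])) := by
        cases cur with
        | none => simp [pvPass1, pvFlush, h]
        | some c => obtain ⟨n, s, b⟩ := c; simp [pvPass1, pvFlush, h]
      rw [hp]
      simp [pvRunRec, h, ih]
    · cases cur with
      | none =>
        have hp : pvPass1 ([], (none : Option pvSeg)) (i, a) = ([], none) := by
          simp [pvPass1, h]
        rw [hp]
        simp [pvRunRec, h, ih]
      | some c =>
        obtain ⟨n, s, b⟩ := c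
        have hp : pvPass1 ([], some (n, s, b)) (i, a) = ([], some (n, s, b ++ [(i, a)])) := by
          simp [pvPass1, h]
        rw [hp]
        simp [pvRunRec, h, ih]

theorem pvAStep_nonemp (d : PySem.Dict String Int) (name : String) (s t l i : Int) (a : String)
    (h : ¬ PySem.Chars.startswith a.toList ['e','m','p','l','o','y','e','e'] = true) :
    pvAStep (d, name, s, t, l) (i, a) = (d, name, pvSegStep (s, t, l) (i, a)) := by
  by_cases h1 : a = "online"
  · simp [pvAStep, pvSegStep, h1]
    intro hc; exact absurd hc (by decide)
  · by_cases h2 : a = "offline"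
    · simp [pvAStep, pvSegStep, h2]
      intro hc; exact absurd hc (by decide)
    · by_cases h3 : a = "leave"
      · simp [pvAStep, pvSegStep, h3]
        intro hc; exact absurd hc (by decide)
      · simp [pvAStep, pvSegStep, h, h1, h2, h3]

theorem pvStartswith_ne_empty (a : String)
    (h : PySem.Chars.startswith a.toList ['e','m','p','l','o','y','e','e'] = true) :
    a ≠ "" := by
  intro he
  subst he
  exact absurd h (by decide)

-- main invariant, open-segment case
theorem pvMain1 (ps : List (Int × String)) :
    ∀ (d : PySem.Dict String Int) (name : String) (start : Int) (b : List (Int × String)) (s t l : Int),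
    name ≠ "" → b.foldl pvSegStep (start, 0, 0) = (s, t, l) →
    pvFinA (ps.foldl pvAStep (d, name, s, t, l)) =
      (pvRunRec ps (some (name, start, b))).foldl pvInsSeg d := by
  induction ps with
  | nil =>
    intro d name start b s t l hn hb
    simp [pvFinA, hn, pvRunRec, pvFlush, pvInsSeg, hb]
  | cons p ps ih =>
    intro d name start b s t l hn hb
    obtain ⟨i, a⟩ := p
    simp only [List.foldl_cons]
    by_cases h : PySem.Chars.startswith a.toList ['e','m','p','l','o','y','e','e'] = true
    · rw [show pvAStep (d, name, s, t, l) (i, a) = (d.insert name t, a, i, 0, 0) from by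
        simp [pvAStep, h, hn]]
      rw [ih (d.insert name t) a i [] i 0 0 (pvStartswith_ne_empty a h) (by simp)]
      simp [pvRunRec, h, pvFlush, pvInsSeg, hb]
    · rw [pvAStep_nonemp d name s t l i a h]
      rcases hseg : pvSegStep (s, t, l) (i, a) with ⟨s', t', l'⟩
      rw [ih d name start (b ++ [(i, a)]) s' t' l' hn
        (by rw [List.foldl_append, hb]; simpa using hseg)]
      simp [pvRunRec, h]

-- main invariant, prefix (no employee seen yet) case
theorem pvMain0 (ps : List (Int × String)) :
    ∀ (d : PySem.Dict String Int) (s t l : Int),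
    pvFinA (ps.foldl pvAStep (d, "", s, t, l)) =
      (pvRunRec ps none).foldl pvInsSeg d := by
  induction ps with
  | nil => intro d s t l; simp [pvFinA, pvRunRec, pvFlush]
  | cons p ps ih =>
    intro d s t l
    obtain ⟨i, a⟩ := p
    simp only [List.foldl_cons]
    by_cases h : PySem.Chars.startswith a.toList ['e','m','p','l','o','y','e','e'] = true
    · rw [show pvAStep (d, "", s, t, l) (i, a) = (d, a, i, 0, 0) from by simp [pvAStep, h]]
      rw [pvMain1 ps d a i [] i 0 0 (pvStartswith_ne_empty a h) (by simp)]
      simp [pvRunRec, h, pvFlush]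
    · rw [pvAStep_nonemp d "" s t l i a h]
      rcases hseg : pvSegStep (s, t, l) (i, a) with ⟨s', t', l'⟩
      rw [ih d s' t' l']
      simp [pvRunRec, h]

-- ===== VERDICT (by name: the statement is the Claim_ definition above) =====
theorem calculate_online_time_spec : Claim_equal_calculate_online_time := by
  intro actions _
  unfold Spec_calculate_online_time calculate_online_time calculate_online_time_alt
  have hmain := pvMain0 (PySem.List.enumerate actions) PySem.Dict.empty 0 0 0
  rw [pvRunRec_eq] at hmain
  rcases hA : (PySem.List.enumerate actions).foldl pvAStep (PySem.Dict.empty, "", 0, 0, 0) with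
    ⟨d, cur, s, t, l⟩
  rcases hB : (PySem.List.enumerate actions).foldl pvPass1 ([], none) with ⟨segs0, curo⟩
  rw [hA, hB] at hmain
  simp only [pvFinA] at hmain
  cases curo with
  | none => simpa [pvFlush] using congrArg PySem.Dict.items hmain
  | some c => simpa [pvFlush] using congrArg PySem.Dict.items hmain
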